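-- pv_equiv track=rewrite | github.com/rraquel/KnowtheeJune2025 | backend/services/vector/summarizer.py | summarize_idi
-- ===== SOURCE A (Python) =====
-- from typing import Dict, Any
--
-- def summarize_idi(scores: Dict[str, int]) -> str:
--     """
--     Generate a summary of IDI assessment scores.
--
--     Args:
--         scores: Dictionary of IDI scale scores
--
--     Returns:
--         Natural language summary of assessment
--     """
--     # Define scale descriptions
--     scale_descriptions = {
--         "Denial": "awareness of cultural differences",
--         "Defense": "reaction to cultural differences",
--         "Minimization": "understanding of cultural commonalities",
--         "Acceptance": "appreciation of cultural differences",
--         "Adaptation": "ability to adapt to different cultures"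
--     }
--
--     # Generate summary
--     summary = []
--     summary.append("IDI Assessment Summary:")
--
--     # Add overall impression
--     high_scores = {k: v for k, v in scores.items() if v >= 70}
--     low_scores = {k: v for k, v in scores.items() if v <= 30}
--
--     if high_scores:
--         summary.append("\nKey Strengths:")
--         for scale, score in high_scores.items():
--             desc = scale_descriptions.get(scale, scale.lower())
--             summary.append(f"- Strong {desc} (score: {score})")
--
--     if low_scores:
--         summary.append("\nDevelopment Areas:")
--         for scale, score in low_scores.items():
--             desc = scale_descriptions.get(scale, scale.lower())
--             summary.append(f"- Limited {desc} (score: {score})")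
--
--     # Add moderate scores
--     moderate_scores = {k: v for k, v in scores.items() if 30 < v < 70}
--     if moderate_scores:
--         summary.append("\nModerate Areas:")
--         for scale, score in moderate_scores.items():
--             desc = scale_descriptions.get(scale, scale.lower())
--             summary.append(f"- Average {desc} (score: {score})")
--
--     return "\n".join(summary)
-- ===== SOURCE B (Python) =====
-- def summarize_idi(scores):
--     scale_descriptions = {
--         "Denial": "awareness of cultural differences",
--         "Defense": "reaction to cultural differences",
--         "Minimization": "understanding of cultural commonalities",
--         "Acceptance": "appreciation of cultural differences",
--         "Adaptation": "ability to adapt to different cultures",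
--     }
--     high, low, moderate = [], [], []
--     for scale, v in scores.items():
--         desc = scale_descriptions.get(scale, scale.lower())
--         if v >= 70:
--             high.append(f"- Strong {desc} (score: {v})")
--         elif v <= 30:
--             low.append(f"- Limited {desc} (score: {v})")
--         else:
--             moderate.append(f"- Average {desc} (score: {v})")
--     out = "IDI Assessment Summary:"
--     for header, lines in (("\nKey Strengths:", high),
--                           ("\nDevelopment Areas:", low),
--                           ("\nModerate Areas:", moderate)):
--         if lines:
--             out += "\n" + header + "\n" + "\n".join(lines)
--     return out
-- ===== Notes on version B (the rewrite author's own statement) =====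
-- stated objective: alternative
-- what changed: One dispatching pass over scores.items() classifies each score into three pre-formatted band buckets and the text is assembled by string concatenation over a table of (header, bucket) pairs, instead of A's three separate dict comprehensions re-scanning the dict and list-append loops joined at the end.
import Mathlib
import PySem

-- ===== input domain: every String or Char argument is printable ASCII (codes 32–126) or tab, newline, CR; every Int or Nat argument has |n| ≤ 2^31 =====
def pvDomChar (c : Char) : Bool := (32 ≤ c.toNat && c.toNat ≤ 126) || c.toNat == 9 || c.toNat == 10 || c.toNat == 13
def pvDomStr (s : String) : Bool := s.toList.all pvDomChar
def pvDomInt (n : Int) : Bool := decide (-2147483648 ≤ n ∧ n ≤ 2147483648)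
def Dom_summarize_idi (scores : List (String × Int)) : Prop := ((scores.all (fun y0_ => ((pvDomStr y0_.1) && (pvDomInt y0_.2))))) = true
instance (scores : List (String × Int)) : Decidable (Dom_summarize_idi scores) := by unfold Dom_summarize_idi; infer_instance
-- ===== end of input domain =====

-- B replaces A's three separate dict-comprehension scans and append loops by one
-- dispatching pass into three pre-formatted buckets assembled from a (header, bucket)
-- table (objective: alternative decomposition, same O(n) cost).


-- ===== PORT A =====
-- shared by both ports: scale_descriptions.get(scale, scale.lower()) (identical literal dict in A and B)
def idiDesc (scale : String) : String :=
  ((PySem.Dict.ofList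
      [("Denial", "awareness of cultural differences"),
       ("Defense", "reaction to cultural differences"),
       ("Minimization", "understanding of cultural commonalities"),
       ("Acceptance", "appreciation of cultural differences"),
       ("Adaptation", "ability to adapt to different cultures")]).get? scale).getD
    (PySem.Str.lower scale)

-- A: the input dict's items (insertion order, unique keys: the tester builds the dict from the pairs)
def summarize_idi (scores : List (String × Int)) : String :=
  let items := (PySem.Dict.ofList scores).items
  let summary : List String := ["IDI Assessment Summary:"]
  -- {k: v for k, v in scores.items() if v >= 70}: keys are unique, so its items are the filtered items
  let high_scores := items.filter (fun p => decide (70 ≤ p.2))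
  let low_scores := items.filter (fun p => decide (p.2 ≤ 30))
  let summary :=
    if high_scores ≠ [] then
      high_scores.foldl
        (fun s p => s ++ ["- Strong " ++ idiDesc p.1 ++ " (score: " ++ PySem.Int.toStr p.2 ++ ")"])
        (summary ++ ["\nKey Strengths:"])
    else summary
  let summary :=
    if low_scores ≠ [] then
      low_scores.foldl
        (fun s p => s ++ ["- Limited " ++ idiDesc p.1 ++ " (score: " ++ PySem.Int.toStr p.2 ++ ")"])
        (summary ++ ["\nDevelopment Areas:"])
    else summary
  let moderate_scores := items.filter (fun p => decide (30 < p.2) && decide (p.2 < 70))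
  let summary :=
    if moderate_scores ≠ [] then
      moderate_scores.foldl
        (fun s p => s ++ ["- Average " ++ idiDesc p.1 ++ " (score: " ++ PySem.Int.toStr p.2 ++ ")"])
        (summary ++ ["\nModerate Areas:"])
    else summary
  PySem.Str.join "\n" summary

-- ===== PORT B =====
-- one pass over the dict's items, dispatching each into one of three formatted buckets
def summarize_idi_alt (scores : List (String × Int)) : String :=
  let buckets :=
    ((PySem.Dict.ofList scores).items).foldl
      (fun (acc : List String × List String × List String) p =>
        let desc := idiDesc p.1
        if 70 ≤ p.2 then
          (acc.1 ++ ["- Strong " ++ desc ++ " (score: " ++ PySem.Int.toStr p.2 ++ ")"], acc.2.1, acc.2.2)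
        else if p.2 ≤ 30 then
          (acc.1, acc.2.1 ++ ["- Limited " ++ desc ++ " (score: " ++ PySem.Int.toStr p.2 ++ ")"], acc.2.2)
        else
          (acc.1, acc.2.1, acc.2.2 ++ ["- Average " ++ desc ++ " (score: " ++ PySem.Int.toStr p.2 ++ ")"]))
      ([], [], [])
  let table : List (String × List String) :=
    [("\nKey Strengths:", buckets.1),
     ("\nDevelopment Areas:", buckets.2.1),
     ("\nModerate Areas:", buckets.2.2)]
  table.foldl
    (fun out hl =>
      if hl.2 ≠ [] then out ++ "\n" ++ hl.1 ++ "\n" ++ PySem.Str.join "\n" hl.2 else out)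
    "IDI Assessment Summary:"

-- ===== PRECONDITION & SPEC =====
def Spec_summarize_idi (scores : List (String × Int)) (out : String) : Prop := out = summarize_idi_alt scores
instance (scores : List (String × Int)) (out : String) : Decidable (Spec_summarize_idi scores out) := by unfold Spec_summarize_idi; infer_instance

-- ===== CLAIM (what is proved, stated in full; the proofs are below) =====
def Claim_equal_summarize_idi : Prop := ∀ (scores : List (String × Int)), Dom_summarize_idi scores → Spec_summarize_idi scores (summarize_idi scores)

-- ===== LEMMAS AND PROOFS =====

theorem join_cons_ne (sep h : String) (ls : List String) (hl : ls ≠ []) :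
    PySem.Str.join sep (h :: ls) = h ++ sep ++ PySem.Str.join sep ls := by
  obtain ⟨a, as, rfl⟩ := List.exists_cons_of_ne_nil hl
  apply String.toList_inj.mp
  simp [PySem.Chars.join_cons_cons]

theorem join_append_ne (sep : String) (xs ys : List String) (hx : xs ≠ []) (hy : ys ≠ []) :
    PySem.Str.join sep (xs ++ ys) = PySem.Str.join sep xs ++ sep ++ PySem.Str.join sep ys := by
  induction xs with
  | nil => exact absurd rfl hx
  | cons a as ih =>
    cases as with
    | nil =>
      have h1 : PySem.Str.join sep [a] = a := by
        apply String.toList_inj.mp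
        simp [PySem.Chars.join_singleton]
      simp only [List.singleton_append]
      rw [join_cons_ne sep a ys hy, h1]
    | cons b bs =>
      rw [List.cons_append, join_cons_ne sep a ((b :: bs) ++ ys) (by simp),
          join_cons_ne sep a (b :: bs) (by simp), ih (by simp)]
      simp [String.append_assoc]

-- B's single dispatching pass produces exactly A's three filtered-and-formatted buckets
theorem dispatch_eq_filters (items : List (String × Int)) (h l m : List String) :
    items.foldl
      (fun (acc : List String × List String × List String) p =>
        let desc := idiDesc p.1
        if 70 ≤ p.2 then
          (acc.1 ++ ["- Strong " ++ desc ++ " (score: " ++ PySem.Int.toStr p.2 ++ ")"], acc.2.1, acc.2.2)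
        else if p.2 ≤ 30 then
          (acc.1, acc.2.1 ++ ["- Limited " ++ desc ++ " (score: " ++ PySem.Int.toStr p.2 ++ ")"], acc.2.2)
        else
          (acc.1, acc.2.1, acc.2.2 ++ ["- Average " ++ desc ++ " (score: " ++ PySem.Int.toStr p.2 ++ ")"]))
      (h, l, m)
    = (h ++ (items.filter (fun p => decide (70 ≤ p.2))).map
          (fun p => "- Strong " ++ idiDesc p.1 ++ " (score: " ++ PySem.Int.toStr p.2 ++ ")"),
       l ++ (items.filter (fun p => decide (p.2 ≤ 30))).map
          (fun p => "- Limited " ++ idiDesc p.1 ++ " (score: " ++ PySem.Int.toStr p.2 ++ ")"),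
       m ++ (items.filter (fun p => decide (30 < p.2) && decide (p.2 < 70))).map
          (fun p => "- Average " ++ idiDesc p.1 ++ " (score: " ++ PySem.Int.toStr p.2 ++ ")")) := by
  induction items generalizing h l m with
  | nil => simp
  | cons a as ih =>
    by_cases h70 : 70 ≤ a.2
    · have : ¬ a.2 ≤ 30 := by omega
      simp [List.foldl_cons, h70, this, ih,
            show ¬ (30 < a.2 ∧ a.2 < 70) by omega]
    · by_cases h30 : a.2 ≤ 30
      · simp [List.foldl_cons, h70, h30, ih,
              show ¬ (30 < a.2 ∧ a.2 < 70) by omega]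
      · simp [List.foldl_cons, h70, h30, ih,
              show 30 < a.2 ∧ a.2 < 70 by omega]

theorem flatten_map_singleton {α β : Type} (f : α → β) (xs : List α) :
    (xs.map (fun x => [f x])).flatten = xs.map f := by
  induction xs with
  | nil => rfl
  | cons a as ih => simp [ih]

-- joining A's growing section list equals B's concatenation of gated blocks
theorem join_sections (acc : List String) (hacc : acc ≠ [])
    (table : List (String × List String)) :
    table.foldl
      (fun out hl =>
        if hl.2 ≠ [] then out ++ "\n" ++ hl.1 ++ "\n" ++ PySem.Str.join "\n" hl.2 else out)
      (PySem.Str.join "\n" acc)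
    = PySem.Str.join "\n"
        (table.foldl (fun s hl => if hl.2 ≠ [] then s ++ hl.1 :: hl.2 else s) acc) := by
  induction table generalizing acc with
  | nil => simp
  | cons a t ih =>
    by_cases he : a.2 = []
    · simp only [List.foldl_cons]
      rw [if_neg (by simp [he]), if_neg (by simp [he])]
      exact ih acc hacc
    · have h1 : PySem.Str.join "\n" acc ++ "\n" ++ a.1 ++ "\n" ++ PySem.Str.join "\n" a.2
          = PySem.Str.join "\n" (acc ++ a.1 :: a.2) := by
        rw [join_append_ne "\n" acc (a.1 :: a.2) hacc (by simp),
            join_cons_ne "\n" a.1 a.2 he]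
        simp [String.append_assoc]
      simp only [List.foldl_cons, if_pos he, h1]
      exact ih (acc ++ a.1 :: a.2) (by simp)

-- ===== VERDICT (by name: the statement is the Claim_ definition above) =====
theorem summarize_idi_spec : Claim_equal_summarize_idi := by
  intro scores _
  unfold Spec_summarize_idi summarize_idi summarize_idi_alt
  simp only [dispatch_eq_filters, List.nil_append]
  set items := (PySem.Dict.ofList scores).items with hitems
  set H := (items.filter (fun p => decide (70 ≤ p.2))).map
      (fun p => "- Strong " ++ idiDesc p.1 ++ " (score: " ++ PySem.Int.toStr p.2 ++ ")") with hH
  set L := (items.filter (fun p => decide (p.2 ≤ 30))).map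
      (fun p => "- Limited " ++ idiDesc p.1 ++ " (score: " ++ PySem.Int.toStr p.2 ++ ")") with hL
  set M := (items.filter (fun p => decide (30 < p.2) && decide (p.2 < 70))).map
      (fun p => "- Average " ++ idiDesc p.1 ++ " (score: " ++ PySem.Int.toStr p.2 ++ ")") with hM
  have hB := join_sections ["IDI Assessment Summary:"] (by simp)
      [("\nKey Strengths:", H), ("\nDevelopment Areas:", L), ("\nModerate Areas:", M)]
  have hjoin1 : PySem.Str.join "\n" ["IDI Assessment Summary:"] = "IDI Assessment Summary:" := by
    apply String.toList_inj.mp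
    simp [PySem.Chars.join_singleton]
  rw [hjoin1] at hB
  rw [hB]
  -- both sides are now joins of the same gated section list
  congr 1
  simp only [List.foldl_cons, List.foldl_nil]
  by_cases h1 : items.filter (fun p => decide (70 ≤ p.2)) = [] <;>
    by_cases h2 : items.filter (fun p => decide (p.2 ≤ 30)) = [] <;>
      by_cases h3 : items.filter (fun p => decide (30 < p.2) && decide (p.2 < 70)) = [] <;>
        simp [hH, hL, hM, h1, h2, h3, List.map_eq_nil_iff,
              flatten_map_singleton]
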